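-- pv_equiv track=rewrite | github.com/unibo-toolkit/scraper-service | app/utils/title_formatter.py | format_event_title
-- ===== SOURCE A (Python) =====
-- def format_event_title(title: str) -> str:
--     if not title:
--         return title
--
--     lower = title.lower()
--     result = []
--     capitalize = True
--
--     for ch in lower:
--         if capitalize and ch.isalpha():
--             result.append(ch.upper())
--             capitalize = False
--         else:
--             result.append(ch)
--
--         if ch in ('.', '(', '/'):
--             capitalize = True
--
--     return ''.join(result)
-- ===== SOURCE B (Python) =====
-- def _cap_first(seg: str) -> str:
--     # upper-case the first alphabetic character of seg, if any
--     for i, c in enumerate(seg):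
--         if c.isalpha():
--             return seg[:i] + c.upper() + seg[i + 1:]
--     return seg
--
--
-- def format_event_title(title: str) -> str:
--     # split the lowercased title into text segments separated by the
--     # delimiters '.', '(' and '/', capitalize each segment, re-join.
--     segments = [[]]
--     delims = []
--     for ch in title.lower():
--         if ch in './(':
--             delims.append(ch)
--             segments.append([])
--         else:
--             segments[-1].append(ch)
--     parts = [_cap_first(''.join(segments[0]))]
--     for d, seg in zip(delims, segments[1:]):
--         parts.append(d)
--         parts.append(_cap_first(''.join(seg)))
--     return ''.join(parts)
-- ===== Notes on version B (the rewrite author's own statement) =====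
-- stated objective: alternative
-- what changed: Replaces the char-by-char capitalize-flag loop with a split-into-segments pass (delimiters '.', '(', '/' kept as separators) followed by a per-segment first-letter capitalization and a join.
import Mathlib
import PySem

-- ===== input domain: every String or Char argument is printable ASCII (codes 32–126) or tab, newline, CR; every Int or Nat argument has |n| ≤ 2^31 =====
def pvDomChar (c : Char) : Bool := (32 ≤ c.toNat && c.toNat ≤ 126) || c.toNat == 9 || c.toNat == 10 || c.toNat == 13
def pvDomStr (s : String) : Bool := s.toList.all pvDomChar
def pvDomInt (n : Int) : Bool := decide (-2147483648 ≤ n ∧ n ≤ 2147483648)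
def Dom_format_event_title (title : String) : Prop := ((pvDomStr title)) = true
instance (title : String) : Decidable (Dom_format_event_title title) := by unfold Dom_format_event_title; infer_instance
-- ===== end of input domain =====

-- B replaces A's capitalize-flag character loop with a split-on-delimiters pass plus a
-- per-segment first-letter capitalization (objective: alternative decomposition, same cost).

-- ===== PORT A =====
-- A's for-loop over the lowercased characters, carrying the `capitalize` flag.
def fetLoopA (cap : Bool) : List Char → List Char
  | [] => []
  | c :: rest =>
    let out := if cap && PySem.Chars.isalpha c then PySem.Chars.upperChar c else c
    let cap1 := if cap && PySem.Chars.isalpha c then false else cap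
    let cap2 := if c == '.' || c == '(' || c == '/' then true else cap1
    out :: fetLoopA cap2 rest

def format_event_title (title : String) : String :=
  if title.toList = [] then title
  else String.ofList (fetLoopA true (PySem.Chars.lower title.toList))

-- ===== PORT B =====
-- _cap_first: upper-case the first alphabetic character of the segment, if any.
def fetCapFirst : List Char → List Char
  | [] => []
  | c :: rest =>
    if PySem.Chars.isalpha c then PySem.Chars.upperChar c :: rest
    else c :: fetCapFirst rest

-- the split pass: leading segment, then (delimiter, following segment) pairs.
def fetSplit : List Char → List Char × List (Char × List Char)
  | [] => ([], [])
  | c :: rest =>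
    let (seg, ps) := fetSplit rest
    if c == '.' || c == '(' || c == '/' then ([], (c, seg) :: ps)
    else (c :: seg, ps)

def format_event_title_alt (title : String) : String :=
  let (seg0, ps) := fetSplit (PySem.Chars.lower title.toList)
  String.ofList (fetCapFirst seg0 ++ ps.flatMap (fun p => p.1 :: fetCapFirst p.2))

-- ===== PRECONDITION & SPEC =====
def Spec_format_event_title (title : String) (out : String) : Prop := out = format_event_title_alt title
instance (title : String) (out : String) : Decidable (Spec_format_event_title title out) := by unfold Spec_format_event_title; infer_instance

-- ===== CLAIM (what is proved, stated in full; the proofs are below) =====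
def Claim_equal_format_event_title : Prop := ∀ (title : String), Dom_format_event_title title → Spec_format_event_title title (format_event_title title)

-- ===== LEMMAS AND PROOFS =====

-- B's joined output for a character list.
def fetB (cs : List Char) : List Char :=
  let (seg0, ps) := fetSplit cs
  fetCapFirst seg0 ++ ps.flatMap (fun p => p.1 :: fetCapFirst p.2)

-- with the flag down, A copies the current segment verbatim and resumes with the flag up
-- after the next delimiter; with the flag up, A is exactly B.
theorem fetLoop_eq (cs : List Char) :
    fetLoopA true cs = fetB cs ∧
    fetLoopA false cs =
      (fetSplit cs).1 ++ (fetSplit cs).2.flatMap (fun p => p.1 :: fetCapFirst p.2) := by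
  induction cs with
  | nil => constructor <;> rfl
  | cons c rest ih =>
    obtain ⟨ih1, ih2⟩ := ih
    rcases hsp : fetSplit rest with ⟨seg, ps⟩
    rw [hsp] at ih2
    by_cases hd : (c == '.' || c == '(' || c == '/') = true
    · have hna : PySem.Chars.isalpha c = false := by
        simp only [Bool.or_eq_true, beq_iff_eq] at hd
        rcases hd with (h | h) | h <;> subst h <;> decide
      constructor
      · simp [fetLoopA, fetB, fetSplit, hsp, hd, hna, fetCapFirst, ih1]
      · simp [fetLoopA, fetSplit, hsp, hd, hna, ih1, fetB]
    · have hd' : (c == '.' || c == '(' || c == '/') = false := by simpa using hd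
      by_cases ha : PySem.Chars.isalpha c = true
      · constructor
        · simp [fetLoopA, fetB, fetSplit, hsp, hd', ha, fetCapFirst, ih2]
        · simp [fetLoopA, fetSplit, hsp, hd', ha, ih2]
      · have ha' : PySem.Chars.isalpha c = false := by simpa using ha
        constructor
        · simp [fetLoopA, fetB, fetSplit, hsp, hd', ha', fetCapFirst, ih1, fetB]
        · simp [fetLoopA, fetSplit, hsp, hd', ha', ih2]

-- ===== VERDICT (by name: the statement is the Claim_ definition above) =====
theorem format_event_title_spec : Claim_equal_format_event_title := by
  intro title _
  unfold Spec_format_event_title format_event_title format_event_title_alt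
  by_cases he : title.toList = []
  · rw [if_pos he, he]
    have h0 : title = "" := by
      have := congrArg String.ofList he
      simpa [String.ofList_toList] using this
    rw [h0]
    rfl
  · rw [if_neg he]
    have := (fetLoop_eq (PySem.Chars.lower title.toList)).1
    rw [this]
    rfl
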